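-- pv_equiv track=rewrite | github.com/jukarjalainen/AICCSA---AI-tool-for-Collecting-and-Classifying-Sports-Applications | combiner/enrich_android_compatibility.py | resolve_column_map
-- ===== SOURCE A (Python) =====
-- from typing import Dict, List, Optional, Tuple
--
-- DEFAULT_COL_MAP = {
--     "mobile": "Mobile",
--     "tablet": "Tablet",
--     "chromebook": "Chromebook",
--     "tv": "TV",
--     "watch": "Watch",
--     "car": "Car",
-- }
--
-- def resolve_column_map(header: List[str]) -> Dict[str, str]:
--     lower_to_actual = {h.lower(): h for h in header}
--     def pick(*cands: str, default: str) -> str: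
--         for c in cands:
--             a = lower_to_actual.get(c.lower())
--             if a:
--                 return a
--         return default
--     return {
--         "mobile": pick("mobile", "phone", default=DEFAULT_COL_MAP["mobile"]),
--         "tablet": pick("tablet", default=DEFAULT_COL_MAP["tablet"]),
--         "chromebook": pick("chromebook", default=DEFAULT_COL_MAP["chromebook"]),
--     "tv": pick("tv", "android tv", default=DEFAULT_COL_MAP["tv"]),
--     "watch": pick("watch", "wear", "wear os", "wearos", default=DEFAULT_COL_MAP["watch"]),
--     "car": pick("car", "android auto", "auto", "automotive", default=DEFAULT_COL_MAP["car"]),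
--     }
-- ===== SOURCE B (Python) =====
-- from typing import Dict, List
--
-- DEFAULT_COL_MAP = {
--     "mobile": "Mobile",
--     "tablet": "Tablet",
--     "chromebook": "Chromebook",
--     "tv": "TV",
--     "watch": "Watch",
--     "car": "Car",
-- }
--
-- FIELDS = [
--     ("mobile", ["mobile", "phone"]),
--     ("tablet", ["tablet"]),
--     ("chromebook", ["chromebook"]),
--     ("tv", ["tv", "android tv"]),
--     ("watch", ["watch", "wear", "wear os", "wearos"]),
--     ("car", ["car", "android auto", "auto", "automotive"]),
-- ]
--
-- def resolve_column_map(header: List[str]) -> Dict[str, str]: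
--     out = {}
--     for name, cands in FIELDS:
--         # single forward pass: keep the header with the lowest candidate
--         # priority; on equal priority the later header wins (last wins).
--         prio, val = len(cands), DEFAULT_COL_MAP[name]
--         for h in header:
--             t = h.lower()
--             if t in cands:
--                 i = cands.index(t)
--                 if i <= prio:
--                     prio, val = i, h
--         out[name] = val
--     return out
-- ===== Notes on version B (the rewrite author's own statement) =====
-- stated objective: alternative
-- what changed: Replaces A's precomputed lower-to-actual dict plus per-candidate lookups by a per-field single forward scan of the header that maintains an argmin accumulator (lowest candidate-priority index, last occurrence wins on ties), with no dict and no per-candidate search.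
import Mathlib
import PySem

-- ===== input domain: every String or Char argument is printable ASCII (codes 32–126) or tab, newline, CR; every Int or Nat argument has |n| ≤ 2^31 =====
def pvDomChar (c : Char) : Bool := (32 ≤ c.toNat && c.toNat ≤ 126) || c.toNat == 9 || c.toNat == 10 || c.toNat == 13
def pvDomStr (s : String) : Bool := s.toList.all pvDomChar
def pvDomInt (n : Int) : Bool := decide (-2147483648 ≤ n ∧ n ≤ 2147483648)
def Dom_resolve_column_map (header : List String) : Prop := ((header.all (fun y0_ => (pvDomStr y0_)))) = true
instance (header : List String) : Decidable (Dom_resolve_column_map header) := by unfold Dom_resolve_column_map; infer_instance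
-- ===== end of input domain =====

-- B replaces A's lower->actual dict and per-candidate lookups by a per-field single
-- forward scan keeping an argmin (candidate priority, last-wins) accumulator (alternative).


-- ===== PORT A =====
-- lower_to_actual = {h.lower(): h for h in header}
def pvLowerToActual (header : List String) : PySem.Dict String String :=
  header.foldl (fun d h => d.insert (PySem.Str.lower h) h) PySem.Dict.empty

-- def pick(*cands, default): for c in cands: a = lower_to_actual.get(c.lower()); if a: return a; return default
def pvPickA (d : PySem.Dict String String) (cands : List String) (default : String) : String :=
  match cands with
  | [] => default
  | c :: rest =>
    match d.get? (PySem.Str.lower c) with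
    | some a => if a ≠ "" then a else pvPickA d rest default
    | none => pvPickA d rest default

def resolve_column_map (header : List String) : List (String × String) :=
  let d := pvLowerToActual header
  [("mobile", pvPickA d ["mobile", "phone"] "Mobile"),
   ("tablet", pvPickA d ["tablet"] "Tablet"),
   ("chromebook", pvPickA d ["chromebook"] "Chromebook"),
   ("tv", pvPickA d ["tv", "android tv"] "TV"),
   ("watch", pvPickA d ["watch", "wear", "wear os", "wearos"] "Watch"),
   ("car", pvPickA d ["car", "android auto", "auto", "automotive"] "Car")]

-- ===== PORT B =====
-- inner loop body: t = h.lower(); if t in cands: i = cands.index(t); if i <= prio: prio, val = i, h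
-- ('t in cands' + 'cands.index(t)' are ported together as the single primitive index?)
def pvStep (cands : List String) (st : Nat × String) (h : String) : Nat × String :=
  match PySem.List.index? cands (PySem.Str.lower h) with
  | some i => if i ≤ st.1 then (i, h) else st
  | none => st

-- prio, val = len(cands), default; for h in header: …; return val
def pvBest (header : List String) (cands : List String) (default : String) : String :=
  (header.foldl (pvStep cands) (cands.length, default)).2

def pvFields : List (String × List String × String) :=
  [("mobile", ["mobile", "phone"], "Mobile"),
   ("tablet", ["tablet"], "Tablet"),
   ("chromebook", ["chromebook"], "Chromebook"),
   ("tv", ["tv", "android tv"], "TV"),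
   ("watch", ["watch", "wear", "wear os", "wearos"], "Watch"),
   ("car", ["car", "android auto", "auto", "automotive"], "Car")]

def resolve_column_map_alt (header : List String) : List (String × String) :=
  pvFields.map (fun f => (f.1, pvBest header f.2.1 f.2.2))

-- ===== PRECONDITION & SPEC =====
def Spec_resolve_column_map (header : List String) (out : List (String × String)) : Prop := out = resolve_column_map_alt header
instance (header : List String) (out : List (String × String)) : Decidable (Spec_resolve_column_map header out) := by unfold Spec_resolve_column_map; infer_instance

-- ===== CLAIM (what is proved, stated in full; the proofs are below) =====
def Claim_equal_resolve_column_map : Prop := ∀ (header : List String), Dom_resolve_column_map header → Spec_resolve_column_map header (resolve_column_map header)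

-- ===== LEMMAS AND PROOFS =====

-- common characterization: first candidate (in order) that has a case-insensitive
-- match in the header, taking the LAST matching header occurrence
def pickRev (header cands : List String) (default : String) : String :=
  match cands with
  | [] => default
  | c :: rest =>
    match header.reverse.find? (fun h => PySem.Str.lower h == c) with
    | some a => a
    | none => pickRev header rest default

def pvIdxD (cands : List String) (h : String) : Nat :=
  (PySem.List.index? cands (PySem.Str.lower h)).getD cands.length

def pvMin (cands hs : List String) : Nat :=
  hs.foldl (fun m h => min m (pvIdxD cands h)) cands.length

theorem pv_foldl_min_le_init (f : String → Nat) (hs : List String) :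
    ∀ init : Nat, hs.foldl (fun m h => min m (f h)) init ≤ init := by
  induction hs with
  | nil => intro init; simp
  | cons a t ih =>
    intro init
    calc (a :: t).foldl (fun m h => min m (f h)) init
        = t.foldl (fun m h => min m (f h)) (min init (f a)) := rfl
      _ ≤ min init (f a) := ih _
      _ ≤ init := min_le_left _ _

theorem pv_foldl_min_le_mem (f : String → Nat) (hs : List String) (x : String) (hx : x ∈ hs) :
    ∀ init : Nat, hs.foldl (fun m h => min m (f h)) init ≤ f x := by
  induction hs with
  | nil => cases hx
  | cons a t ih =>
    intro init
    rcases List.mem_cons.mp hx with h | h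
    · subst h
      calc (x :: t).foldl (fun m h => min m (f h)) init
          = t.foldl (fun m h => min m (f h)) (min init (f x)) := rfl
        _ ≤ min init (f x) := pv_foldl_min_le_init f t _
        _ ≤ f x := min_le_right _ _
    · exact ih h _

theorem pv_foldl_min_cases (f : String → Nat) (hs : List String) :
    ∀ init : Nat, hs.foldl (fun m h => min m (f h)) init = init ∨
      ∃ x ∈ hs, hs.foldl (fun m h => min m (f h)) init = f x := by
  induction hs with
  | nil => intro init; left; rfl
  | cons a t ih =>
    intro init
    rcases ih (min init (f a)) with h | ⟨x, hx, hfx⟩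
    · rcases min_choice init (f a) with hm | hm
      · left; simpa [hm] using h
      · right; exact ⟨a, List.mem_cons_self, by simpa [hm] using h⟩
    · right; exact ⟨x, List.mem_cons_of_mem _ hx, hfx⟩

theorem pvMin_le_len (cands hs : List String) : pvMin cands hs ≤ cands.length :=
  pv_foldl_min_le_init _ hs _

theorem pvMin_append (cands hs : List String) (h : String) :
    pvMin cands (hs ++ [h]) = min (pvMin cands hs) (pvIdxD cands h) := by
  simp [pvMin, List.foldl_append]

theorem pickRev_nil (cands : List String) (d : String) : pickRev [] cands d = d := by
  induction cands with
  | nil => rfl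
  | cons c rest ih => simpa [pickRev] using ih

-- h matches no candidate: appending it changes nothing
theorem pickRev_append_nomatch (cands hs : List String) (h d : String)
    (hne : ∀ c ∈ cands, PySem.Str.lower h ≠ c) :
    pickRev (hs ++ [h]) cands d = pickRev hs cands d := by
  induction cands with
  | nil => rfl
  | cons c rest ih =>
    have hc : (PySem.Str.lower h == c) = false := by
      simp [hne c List.mem_cons_self]
    simp only [pickRev, List.reverse_append, List.reverse_singleton, List.singleton_append,
      List.find?_cons, hc]
    cases hf : hs.reverse.find? (fun x => PySem.Str.lower x == c) with
    | some a => rfl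
    | none => exact ih (fun x hx => hne x (List.mem_cons_of_mem _ hx))

-- candidates before i never match, i matches at the head of the reversed list
theorem pickRev_first (cands : List String) (l : List String) (d a : String) :
    ∀ (i : Nat) (hi : i < cands.length),
    (∀ j, j < i → ∀ (hj : j < cands.length),
        l.reverse.find? (fun x => PySem.Str.lower x == cands[j]'hj) = none) →
    l.reverse.find? (fun x => PySem.Str.lower x == cands[i]'hi) = some a →
    pickRev l cands d = a := by
  induction cands with
  | nil => intro i hi; exact absurd hi (Nat.not_lt_zero i)
  | cons c rest ih =>
    intro i hi hnone hsome
    cases i with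
    | zero =>
      simp only [List.getElem_cons_zero] at hsome
      simp [pickRev, hsome]
    | succ k =>
      have h0 : l.reverse.find? (fun x => PySem.Str.lower x == c) = none := by
        have := hnone 0 (Nat.succ_pos k) (Nat.zero_lt_succ rest.length)
        simpa using this
      simp only [pickRev, h0]
      exact ih k (Nat.lt_of_succ_lt_succ hi)
        (fun j hj hjl => by
          have := hnone (j + 1) (Nat.succ_lt_succ hj) (Nat.succ_lt_succ hjl)
          simpa using this)
        (by simpa using hsome)

-- some candidate ≤ p already has a match in l, and h matches nothing ≤ p: appending h changes nothing
theorem pickRev_append_stop (cands : List String) :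
    ∀ (l : List String) (h d : String) (p : Nat) (hp : p < cands.length),
    (l.reverse.find? (fun x => PySem.Str.lower x == cands[p]'hp)).isSome = true →
    (∀ j, j ≤ p → ∀ (hj : j < cands.length), PySem.Str.lower h ≠ cands[j]'hj) →
    pickRev (l ++ [h]) cands d = pickRev l cands d := by
  induction cands with
  | nil => intro l h d p hp; cases hp
  | cons c rest ih =>
    intro l h d p hp hstop hh
    have hc0 : PySem.Str.lower h ≠ c := by
      have := hh 0 (Nat.zero_le _) (Nat.zero_lt_succ rest.length)
      simpa using this
    have hc : (PySem.Str.lower h == c) = false := by simp [hc0]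
    simp only [pickRev, List.reverse_append, List.reverse_singleton, List.singleton_append,
      List.find?_cons, hc]
    cases hf : l.reverse.find? (fun x => PySem.Str.lower x == c) with
    | some a => rfl
    | none =>
      cases p with
      | zero => simp only [List.getElem_cons_zero] at hstop; rw [hf] at hstop; cases hstop
      | succ q =>
        exact ih l h d q (Nat.lt_of_succ_lt_succ hp)
          (by simpa using hstop)
          (fun j hj hjl => by
            have := hh (j + 1) (Nat.succ_le_succ hj) (Nat.succ_lt_succ hjl)
            simpa using this)

-- the B fold computes (min priority, pickRev)
theorem pv_fold_eq (cands : List String) (d : String) (hs : List String) :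
    hs.foldl (pvStep cands) (cands.length, d) = (pvMin cands hs, pickRev hs cands d) := by
  induction hs using List.reverseRecOn with
  | nil => simp [pvMin, pickRev_nil]
  | append_singleton hs h ih =>
    rw [List.foldl_append, ih]
    show pvStep cands (pvMin cands hs, pickRev hs cands d) h = _
    unfold pvStep
    cases hidx : PySem.List.index? cands (PySem.Str.lower h) with
    | none =>
      have hnm : PySem.Str.lower h ∉ cands := by
        exact (PySem.List.index?_eq_none_iff _ _).mp hidx
      have h1 : pvMin cands (hs ++ [h]) = pvMin cands hs := by
        rw [pvMin_append]
        have : pvIdxD cands h = cands.length := by unfold pvIdxD; rw [hidx]; rfl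
        rw [this]
        exact min_eq_left (pvMin_le_len cands hs)
      rw [h1, pickRev_append_nomatch cands hs h d (fun c hc he => hnm (he ▸ hc))]
    | some i =>
      obtain ⟨hi, hEq, hFirst⟩ := PySem.List.getElem_of_index?_eq_some hidx
      have hIdxD : pvIdxD cands h = i := by unfold pvIdxD; rw [hidx]; rfl
      by_cases hle : i ≤ pvMin cands hs
      · simp only [hle, if_pos]
        have h1 : pvMin cands (hs ++ [h]) = i := by
          rw [pvMin_append, hIdxD]; exact min_eq_right hle
        have h2 : pickRev (hs ++ [h]) cands d = h := by
          apply pickRev_first cands (hs ++ [h]) d h i hi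
          · intro j hj hjl
            apply List.find?_eq_none.mpr
            intro x hx
            simp only [List.reverse_append, List.reverse_singleton, List.singleton_append,
              List.mem_cons, List.mem_reverse] at hx
            rcases hx with rfl | hx
            · intro hbe
              have he : PySem.Str.lower x = cands[j] := by simpa using hbe
              exact hFirst j hj he.symm
            · -- x ∈ hs cannot match cands[j] with j < i ≤ pvMin hs
              intro hbe
              have he : PySem.Str.lower x = cands[j] := by simpa using hbe
              have hmem : PySem.Str.lower x ∈ cands := he ▸ (List.getElem_mem hjl)
              obtain ⟨i', hi'⟩ := Option.isSome_iff_exists.mp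
                ((PySem.List.index?_isSome_iff _ _).mpr hmem)
              obtain ⟨hi'l, hEq', hFirst'⟩ := PySem.List.getElem_of_index?_eq_some hi'
              have hile : i' ≤ j := by
                by_contra hgt
                exact hFirst' j (Nat.lt_of_not_le hgt) he.symm
              have hx' : pvIdxD cands x = i' := by unfold pvIdxD; rw [hi']; rfl
              have := pv_foldl_min_le_mem (pvIdxD cands) hs x hx cands.length
              have : pvMin cands hs ≤ i' := hx' ▸ this
              omega
          · simp only [List.reverse_append, List.reverse_singleton, List.singleton_append,
              List.find?_cons]
            have : (PySem.Str.lower h == cands[i]'hi) = true := by simp [hEq]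
            rw [this]
        rw [h1, h2]
      · simp only [hle, if_neg, not_false_iff]
        have hlt : pvMin cands hs < i := Nat.lt_of_not_le hle
        have h1 : pvMin cands (hs ++ [h]) = pvMin cands hs := by
          rw [pvMin_append, hIdxD]; exact min_eq_left (Nat.le_of_lt hlt)
        have hplen : pvMin cands hs < cands.length := hlt.trans hi
        have h2 : pickRev (hs ++ [h]) cands d = pickRev hs cands d := by
          apply pickRev_append_stop cands hs h d (pvMin cands hs) hplen
          · -- some element of hs matches cands[pvMin]
            rcases pv_foldl_min_cases (pvIdxD cands) hs cands.length with hcase | ⟨x, hx, hfx⟩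
            · exact absurd hcase (by unfold pvMin at hplen; omega)
            · have hfx' : pvIdxD cands x = pvMin cands hs := hfx.symm
              have hsome' : PySem.List.index? cands (PySem.Str.lower x) = some (pvMin cands hs) := by
                cases hix : PySem.List.index? cands (PySem.Str.lower x) with
                | none =>
                  exfalso
                  unfold pvIdxD at hfx'; rw [hix] at hfx'
                  simp only [Option.getD_none] at hfx'
                  omega
                | some k =>
                  unfold pvIdxD at hfx'; rw [hix] at hfx'
                  simp only [Option.getD_some] at hfx'
                  rw [hfx']
              obtain ⟨hkl, hkeq, _⟩ := PySem.List.getElem_of_index?_eq_some hsome'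
              apply Option.isSome_iff_exists.mpr
              have : ∃ y ∈ hs.reverse, (PySem.Str.lower y == cands[pvMin cands hs]'hplen) = true :=
                ⟨x, List.mem_reverse.mpr hx, by simp [hkeq]⟩
              obtain ⟨a, ha⟩ := List.find?_isSome.mpr this |> Option.isSome_iff_exists.mp
              exact ⟨a, ha⟩
          · intro j hj hjl he
            exact hFirst j (Nat.lt_of_le_of_lt hj hlt) he.symm
        rw [h1, h2]

-- lookup in the fold-built dict = last header whose lowercase equals the key
theorem pv_get_foldl (header : List String) (d : PySem.Dict String String) (k : String) :
    (header.foldl (fun d h => d.insert (PySem.Str.lower h) h) d).get? k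
      = (header.reverse.find? (fun h => PySem.Str.lower h == k)).or (d.get? k) := by
  induction header generalizing d with
  | nil => simp
  | cons h t ih =>
    simp only [List.foldl_cons, List.reverse_cons, List.find?_append, ih]
    cases hf : t.reverse.find? (fun h => PySem.Str.lower h == k) with
    | some a => simp
    | none =>
      simp only [Option.or]
      rw [PySem.Dict.get?_insert]
      by_cases hk : PySem.Str.lower h = k
      · simp [hk]
      · simp [beq_iff_eq, hk, Ne.symm hk]

-- the A pick = pickRev, for lowercase nonempty candidate lists
theorem pv_pickA_eq (header : List String) (cands : List String) (d : String)
    (hc1 : ∀ c ∈ cands, PySem.Str.lower c = c) (hc2 : ∀ c ∈ cands, c ≠ "") :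
    pvPickA (pvLowerToActual header) cands d = pickRev header cands d := by
  induction cands with
  | nil => rfl
  | cons c rest ih =>
    have hrec := ih (fun x hx => hc1 x (List.mem_cons_of_mem _ hx))
      (fun x hx => hc2 x (List.mem_cons_of_mem _ hx))
    simp only [pvPickA, pickRev, pvLowerToActual, pv_get_foldl,
      PySem.Dict.get?_empty, Option.or_none, hc1 c List.mem_cons_self]
    cases hf : header.reverse.find? (fun h => PySem.Str.lower h == c) with
    | none => simpa [pvLowerToActual] using hrec
    | some a =>
      have hla : PySem.Str.lower a = c := by simpa using List.find?_some hf
      have hane : a ≠ "" := by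
        intro he
        apply hc2 c List.mem_cons_self
        rw [← hla, he]; rfl
      simp [hane]

-- ===== VERDICT (by name: the statement is the Claim_ definition above) =====
theorem resolve_column_map_spec : Claim_equal_resolve_column_map := by
  intro header _
  unfold Spec_resolve_column_map resolve_column_map resolve_column_map_alt pvFields
  have key : ∀ (cands : List String) (dft : String),
      (∀ c ∈ cands, PySem.Str.lower c = c) → (∀ c ∈ cands, c ≠ "") →
      pvPickA (pvLowerToActual header) cands dft = pvBest header cands dft := by
    intro cands dft h1 h2
    rw [pv_pickA_eq header cands dft h1 h2]
    unfold pvBest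
    rw [pv_fold_eq]
  simp only [List.map]
  rw [key ["mobile", "phone"] "Mobile" (by decide) (by decide),
      key ["tablet"] "Tablet" (by decide) (by decide),
      key ["chromebook"] "Chromebook" (by decide) (by decide),
      key ["tv", "android tv"] "TV" (by decide) (by decide),
      key ["watch", "wear", "wear os", "wearos"] "Watch" (by decide) (by decide),
      key ["car", "android auto", "auto", "automotive"] "Car" (by decide) (by decide)]
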